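-- pv_equiv track=rewrite | github.com/delimatsuo/headhunter | scripts/skill_assessment_service.py | _skills_related
-- ===== SOURCE A (Python) =====
-- def _skills_related(skill1: str, skill2: str) -> bool:
--     """Check if two skills are related"""
--     # Simple relatedness check - in production this could use embeddings
--     skill1_words = set(skill1.lower().split())
--     skill2_words = set(skill2.lower().split())
--
--     # Check for word overlap
--     if skill1_words & skill2_words:
--         return True
--
--     # Check skill families
--     skill_families = [
--         {"python", "django", "flask", "fastapi"},
--         {"javascript", "react", "angular", "vue", "node.js"},
--         {"aws", "azure", "gcp", "cloud"},
--         {"docker", "kubernetes", "containerization"},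
--         {"leadership", "management", "mentoring"}
--     ]
--
--     for family in skill_families:
--         if skill1 in family and skill2 in family:
--             return True
--
--     return False
-- ===== SOURCE B (Python) =====
-- _SKILL_FAMILIES = [
--     {"python", "django", "flask", "fastapi"},
--     {"javascript", "react", "angular", "vue", "node.js"},
--     {"aws", "azure", "gcp", "cloud"},
--     {"docker", "kubernetes", "containerization"},
--     {"leadership", "management", "mentoring"},
-- ]
--
-- # Each skill string maps to its family's tag token "f:<i>" (families are disjoint).
-- _FAMILY_TAG = {skill: "f:%d" % i for i, fam in enumerate(_SKILL_FAMILIES) for skill in fam}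
--
--
-- def _tokens(skill):
--     """All relatedness tokens of a skill: its lowercased words tagged 'w:',
--     plus the family tag of the raw skill string, if it has one."""
--     toks = {"w:" + w for w in skill.lower().split()}
--     tag = _FAMILY_TAG.get(skill)
--     if tag is not None:
--         toks.add(tag)
--     return toks
--
--
-- def _skills_related(skill1, skill2):
--     """Check if two skills are related"""
--     # Related iff the token sets meet: a shared word or a shared family tag.
--     return not _tokens(skill1).isdisjoint(_tokens(skill2))
-- ===== Notes on version B (the rewrite author's own statement) =====
-- stated objective: alternative
-- what changed: Instead of a staged test (word-overlap check, then a scan over the family sets), B canonicalises each skill once into a single token set (tagged lowercased words plus a precomputed family tag) and decides relatedness by one set-disjointness test.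
import Mathlib
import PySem

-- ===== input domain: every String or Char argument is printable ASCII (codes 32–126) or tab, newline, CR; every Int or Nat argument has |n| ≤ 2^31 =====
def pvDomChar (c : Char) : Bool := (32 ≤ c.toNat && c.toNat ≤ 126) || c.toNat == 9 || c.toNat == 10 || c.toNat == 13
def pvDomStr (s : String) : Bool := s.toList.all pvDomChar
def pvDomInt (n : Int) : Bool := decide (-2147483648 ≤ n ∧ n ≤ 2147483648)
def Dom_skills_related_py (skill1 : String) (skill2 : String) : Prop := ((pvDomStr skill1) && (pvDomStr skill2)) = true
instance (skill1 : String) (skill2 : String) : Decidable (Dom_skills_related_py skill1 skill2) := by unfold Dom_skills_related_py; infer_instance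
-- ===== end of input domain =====

-- B replaces A's staged test (word overlap, then a scan over the family sets) by canonicalising
-- each skill into ONE token set (tagged words plus a precomputed family tag) and a single
-- set-disjointness test (objective: alternative).

-- ===== PORT A =====
def skillFamilies : List (PySem.Set String) :=
  [PySem.Set.ofList ["python", "django", "flask", "fastapi"],
   PySem.Set.ofList ["javascript", "react", "angular", "vue", "node.js"],
   PySem.Set.ofList ["aws", "azure", "gcp", "cloud"],
   PySem.Set.ofList ["docker", "kubernetes", "containerization"],
   PySem.Set.ofList ["leadership", "management", "mentoring"]]

def skills_related_py (skill1 : String) (skill2 : String) : Bool :=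
  let skill1_words := PySem.Set.ofList (PySem.Str.split₀ (PySem.Str.lower skill1))
  let skill2_words := PySem.Set.ofList (PySem.Str.split₀ (PySem.Str.lower skill2))
  if PySem.Set.inter skill1_words skill2_words ≠ ([] : List String) then true
  else
    -- 'for family in skill_families: if skill1 in family and skill2 in family: return True' / 'return False'
    skillFamilies.any (fun family => PySem.Set.contains family skill1 && PySem.Set.contains family skill2)

-- ===== PORT B =====
-- the dict comprehension {skill: "f:%d" % i for i, fam in enumerate for skill in fam}; within a
-- family the insertion order is Python's set order, but every value of a family is the same tag
-- and only .get is used, so that order cannot affect any result.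
def famTag : PySem.Dict String String :=
  PySem.Dict.ofList
    [("python", "f:0"), ("django", "f:0"), ("flask", "f:0"), ("fastapi", "f:0"),
     ("javascript", "f:1"), ("react", "f:1"), ("angular", "f:1"), ("vue", "f:1"), ("node.js", "f:1"),
     ("aws", "f:2"), ("azure", "f:2"), ("gcp", "f:2"), ("cloud", "f:2"),
     ("docker", "f:3"), ("kubernetes", "f:3"), ("containerization", "f:3"),
     ("leadership", "f:4"), ("management", "f:4"), ("mentoring", "f:4")]

def tokensOf (skill : String) : PySem.Set String :=
  let toks := PySem.Set.ofList ((PySem.Str.split₀ (PySem.Str.lower skill)).map (fun w => "w:" ++ w))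
  match PySem.Dict.get? famTag skill with
  | some tag => PySem.Set.add toks tag
  | none => toks

def skills_related_py_alt (skill1 : String) (skill2 : String) : Bool :=
  !(PySem.Set.isdisjoint (tokensOf skill1) (tokensOf skill2))

-- ===== PRECONDITION & SPEC =====
def Spec_skills_related_py (skill1 : String) (skill2 : String) (out : Bool) : Prop := out = skills_related_py_alt skill1 skill2
instance (skill1 : String) (skill2 : String) (out : Bool) : Decidable (Spec_skills_related_py skill1 skill2 out) := by unfold Spec_skills_related_py; infer_instance

-- ===== CLAIM (what is proved, stated in full; the proofs are below) =====
def Claim_equal_skills_related_py : Prop := ∀ (skill1 : String) (skill2 : String), Dom_skills_related_py skill1 skill2 → Spec_skills_related_py skill1 skill2 (skills_related_py skill1 skill2)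

-- ===== LEMMAS AND PROOFS =====

-- the word set of a skill (proof abbreviation)
def pvW (s : String) : List String := PySem.Set.ofList (PySem.Str.split₀ (PySem.Str.lower s))

lemma mem_tokensOf (s x : String) :
    x ∈ tokensOf s ↔ (∃ w ∈ pvW s, x = "w:" ++ w) ∨ PySem.Dict.get? famTag s = some x := by
  unfold tokensOf pvW
  cases h : PySem.Dict.get? famTag s with
  | none =>
      simp only [PySem.Set.mem_ofList, List.mem_map]
      constructor
      · rintro ⟨w, hw, rfl⟩; exact Or.inl ⟨w, hw, rfl⟩
      · rintro (⟨w, hw, rfl⟩ | hc)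
        · exact ⟨w, hw, rfl⟩
        · cases hc
  | some tag =>
      rw [PySem.Set.mem_add]
      simp only [PySem.Set.mem_ofList, List.mem_map, Option.some.injEq]
      constructor
      · rintro (⟨w, hw, rfl⟩ | rfl)
        · exact Or.inl ⟨w, hw, rfl⟩
        · exact Or.inr rfl
      · rintro (⟨w, hw, rfl⟩ | rfl)
        · exact Or.inl ⟨w, hw, rfl⟩
        · exact Or.inr rfl

lemma tag_shape (s t : String) (h : PySem.Dict.get? famTag s = some t) :
    t ∈ ["f:0", "f:1", "f:2", "f:3", "f:4"] := by
  have hm := PySem.Dict.mem_items_of_get?_eq_some _ h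
  fin_cases hm <;> simp_all

lemma word_ne_tag (w t : String) (ht : t ∈ ["f:0", "f:1", "f:2", "f:3", "f:4"]) :
    "w:" ++ w ≠ t := by
  intro h
  have hd : ("w:" ++ w).toList = t.toList := congrArg String.toList h
  rw [String.toList_append] at hd
  fin_cases ht <;> simp_all

lemma word_inj (a b : String) (h : "w:" ++ a = "w:" ++ b) : a = b := by
  have hd := congrArg String.toList h
  rw [String.toList_append, String.toList_append] at hd
  have := List.append_cancel_left hd
  exact String.ext this

lemma tag0 (s : String) (h : s ∈ PySem.Set.ofList ["python", "django", "flask", "fastapi"]) :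
    PySem.Dict.get? famTag s = some "f:0" := by
  simp only [PySem.Set.mem_ofList] at h; fin_cases h <;> decide
lemma tag1 (s : String) (h : s ∈ PySem.Set.ofList ["javascript", "react", "angular", "vue", "node.js"]) :
    PySem.Dict.get? famTag s = some "f:1" := by
  simp only [PySem.Set.mem_ofList] at h; fin_cases h <;> decide
lemma tag2 (s : String) (h : s ∈ PySem.Set.ofList ["aws", "azure", "gcp", "cloud"]) :
    PySem.Dict.get? famTag s = some "f:2" := by
  simp only [PySem.Set.mem_ofList] at h; fin_cases h <;> decide
lemma tag3 (s : String) (h : s ∈ PySem.Set.ofList ["docker", "kubernetes", "containerization"]) :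
    PySem.Dict.get? famTag s = some "f:3" := by
  simp only [PySem.Set.mem_ofList] at h; fin_cases h <;> decide
lemma tag4 (s : String) (h : s ∈ PySem.Set.ofList ["leadership", "management", "mentoring"]) :
    PySem.Dict.get? famTag s = some "f:4" := by
  simp only [PySem.Set.mem_ofList] at h; fin_cases h <;> decide

def famAny (s1 s2 : String) : Bool :=
  skillFamilies.any (fun family => PySem.Set.contains family s1 && PySem.Set.contains family s2)

lemma fam_to_tag (s1 s2 : String) (h : famAny s1 s2 = true) :
    ∃ t, PySem.Dict.get? famTag s1 = some t ∧ PySem.Dict.get? famTag s2 = some t := by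
  unfold famAny at h
  rw [List.any_eq_true] at h
  obtain ⟨fam, hf, hc⟩ := h
  rw [Bool.and_eq_true, PySem.Set.contains_iff, PySem.Set.contains_iff] at hc
  obtain ⟨h1, h2⟩ := hc
  unfold skillFamilies at hf
  fin_cases hf
  · exact ⟨_, tag0 s1 h1, tag0 s2 h2⟩
  · exact ⟨_, tag1 s1 h1, tag1 s2 h2⟩
  · exact ⟨_, tag2 s1 h1, tag2 s2 h2⟩
  · exact ⟨_, tag3 s1 h1, tag3 s2 h2⟩
  · exact ⟨_, tag4 s1 h1, tag4 s2 h2⟩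

lemma tag_to_fam (s1 s2 t : String)
    (h1 : PySem.Dict.get? famTag s1 = some t) (h2 : PySem.Dict.get? famTag s2 = some t) :
    famAny s1 s2 = true := by
  have hitems : famTag.items =
      [("python", "f:0"), ("django", "f:0"), ("flask", "f:0"), ("fastapi", "f:0"),
       ("javascript", "f:1"), ("react", "f:1"), ("angular", "f:1"), ("vue", "f:1"), ("node.js", "f:1"),
       ("aws", "f:2"), ("azure", "f:2"), ("gcp", "f:2"), ("cloud", "f:2"),
       ("docker", "f:3"), ("kubernetes", "f:3"), ("containerization", "f:3"),
       ("leadership", "f:4"), ("management", "f:4"), ("mentoring", "f:4")] := by decide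
  have m1 := PySem.Dict.mem_items_of_get?_eq_some _ h1
  have m2 := PySem.Dict.mem_items_of_get?_eq_some _ h2
  rw [hitems] at m1 m2
  simp only [List.mem_cons, List.not_mem_nil, or_false, Prod.mk.injEq] at m1 m2
  rcases m1 with ⟨rfl, rfl⟩|⟨rfl, rfl⟩|⟨rfl, rfl⟩|⟨rfl, rfl⟩|⟨rfl, rfl⟩|⟨rfl, rfl⟩|⟨rfl, rfl⟩|⟨rfl, rfl⟩|⟨rfl, rfl⟩|⟨rfl, rfl⟩|⟨rfl, rfl⟩|⟨rfl, rfl⟩|⟨rfl, rfl⟩|⟨rfl, rfl⟩|⟨rfl, rfl⟩|⟨rfl, rfl⟩|⟨rfl, rfl⟩|⟨rfl, rfl⟩|⟨rfl, rfl⟩ <;>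
    simp at m2 <;>
    (first
      | (rcases m2 with rfl | rfl | rfl)
      | (rcases m2 with rfl | rfl | rfl | rfl)
      | (rcases m2 with rfl | rfl | rfl | rfl | rfl)) <;>
    decide

lemma word_mem_tokensOf (s w : String) (h : w ∈ pvW s) : ("w:" ++ w) ∈ tokensOf s := by
  rw [mem_tokensOf]; exact Or.inl ⟨w, h, rfl⟩

lemma tag_mem_tokensOf (s t : String) (h : PySem.Dict.get? famTag s = some t) : t ∈ tokensOf s := by
  rw [mem_tokensOf]; exact Or.inr h

-- ===== VERDICT (by name: the statement is the Claim_ definition above) =====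
theorem skills_related_py_spec : Claim_equal_skills_related_py := by
  intro s1 s2 _
  unfold Spec_skills_related_py skills_related_py skills_related_py_alt
  show (if PySem.Set.inter (pvW s1) (pvW s2) ≠ ([] : List String) then true else famAny s1 s2)
      = !(PySem.Set.isdisjoint (tokensOf s1) (tokensOf s2))
  have hiff : PySem.Set.isdisjoint (tokensOf s1) (tokensOf s2) = false ↔
      (PySem.Set.inter (pvW s1) (pvW s2) ≠ ([] : List String)) ∨ famAny s1 s2 = true := by
    rw [← Bool.not_eq_true, PySem.Set.isdisjoint_iff]
    push Not
    constructor
    · rintro ⟨x, hx1, hx2⟩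
      rw [mem_tokensOf] at hx1 hx2
      rcases hx1 with ⟨w1, hw1, rfl⟩ | ht1
      · rcases hx2 with ⟨w2, hw2, heq⟩ | ht2
        · have : w1 = w2 := word_inj w1 w2 heq
          subst this
          refine Or.inl (List.ne_nil_of_mem (a := w1) ?_)
          rw [PySem.Set.mem_inter]; exact ⟨hw1, hw2⟩
        · exact absurd rfl (word_ne_tag w1 _ (tag_shape s2 _ ht2))
      · rcases hx2 with ⟨w2, hw2, heq⟩ | ht2
        · exact absurd heq.symm (word_ne_tag w2 _ (tag_shape s1 _ ht1))
        · exact Or.inr (tag_to_fam s1 s2 x ht1 ht2)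
    · rintro (hne | hfam)
      · obtain ⟨x, hx⟩ := List.exists_mem_of_ne_nil _ hne
        rw [PySem.Set.mem_inter] at hx
        exact ⟨"w:" ++ x, word_mem_tokensOf s1 x hx.1, word_mem_tokensOf s2 x hx.2⟩
      · obtain ⟨t, h1, h2⟩ := fam_to_tag s1 s2 hfam
        exact ⟨t, tag_mem_tokensOf s1 t h1, tag_mem_tokensOf s2 t h2⟩
  split_ifs with hc
  · rw [hiff.mpr (Or.inl hc)]; rfl
  · cases hf : famAny s1 s2 with
    | true => rw [hiff.mpr (Or.inr hf)]; rfl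
    | false =>
        cases hd : PySem.Set.isdisjoint (tokensOf s1) (tokensOf s2) with
        | true => rfl
        | false =>
            rcases hiff.mp hd with h | h
            · exact absurd h hc
            · rw [hf] at h; cases h
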